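-- pv_equiv track=rewrite | github.com/woee3/algorithm | programers/python/64062_징검다리 건너기 .py | determine
-- ===== SOURCE A (Python) =====
-- def determine(stones, k, n):
--     cnt = 0
--     for s in stones:
--         if s - n < 1:
--             cnt += 1
--         else:
--             cnt = 0
--         if cnt == k:
--             return False
--     return True
-- ===== SOURCE B (Python) =====
-- def determine(stones, k, n):
--     # Summarize first, compare once: the longest run of consecutive "bad"
--     # stones (s - n < 1) is the largest gap between consecutive good-stone
--     # positions (with sentinels -1 and len(stones)); crossing succeeds iff
--     # that run is shorter than k.
--     good = [i for i, s in enumerate(stones) if s - n >= 1]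
--     bounds = [-1] + good + [len(stones)]
--     longest = max(j - i - 1 for i, j in zip(bounds, bounds[1:]))
--     return longest < k
-- ===== Notes on version B (the rewrite author's own statement) =====
-- stated objective: alternative
-- what changed: Instead of scanning with a resettable counter and early exit, B collects the positions of good stones once and takes the maximum gap between consecutive good positions (with sentinels), comparing that single summary against k.
-- outside the precondition, e.g. on determine([5], 0, 5): A returns True, B returns False; on determine([], -1, 0): A returns True, B returns False
import Mathlib
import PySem

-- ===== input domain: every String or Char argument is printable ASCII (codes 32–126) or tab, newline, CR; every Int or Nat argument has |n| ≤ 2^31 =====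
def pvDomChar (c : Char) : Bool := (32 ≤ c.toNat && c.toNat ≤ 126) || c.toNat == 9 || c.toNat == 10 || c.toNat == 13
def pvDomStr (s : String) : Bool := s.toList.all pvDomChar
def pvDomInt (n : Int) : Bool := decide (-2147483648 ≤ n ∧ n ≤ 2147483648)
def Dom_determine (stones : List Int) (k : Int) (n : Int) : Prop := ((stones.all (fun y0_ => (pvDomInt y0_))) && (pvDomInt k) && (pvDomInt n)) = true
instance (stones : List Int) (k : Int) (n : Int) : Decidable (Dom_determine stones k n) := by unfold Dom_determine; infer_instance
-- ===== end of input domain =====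

-- B replaces A's resettable counter with a gap-between-good-stones summary (same cost, different decomposition); equivalence is claimed on the natural domain k ≥ 1.

-- ===== PORT A =====
def determineGo (k : Int) (n : Int) : List Int → Int → Bool
  | [], _ => true
  | s :: rest, cnt =>
    let cnt' := if s - n < 1 then cnt + 1 else 0
    if cnt' = k then false else determineGo k n rest cnt'

def determine (stones : List Int) (k : Int) (n : Int) : Bool :=
  determineGo k n stones 0

-- ===== PORT B =====
def determine_alt (stones : List Int) (k : Int) (n : Int) : Bool :=
  let good := ((PySem.List.enumerate stones).filter (fun p => decide (1 ≤ p.2 - n))).map (fun p => p.1)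
  let bounds := (-1 : Int) :: (good ++ [(stones.length : Int)])
  -- bounds[1:] of the nonempty list bounds is its tail; max over the (always nonempty)
  -- gap list is ported with PySem.List.max?; the .getD 0 branch is unreachable.
  let longest := (PySem.List.max? ((bounds.zip bounds.tail).map (fun p => p.2 - p.1 - 1)) (fun y => y)).getD 0
  decide (longest < k)

-- ===== PRECONDITION & SPEC =====
-- Pre_ excludes k ≤ 0 (a non-positive limit on consecutive skipped stones, outside the
-- problem's natural domain), where no return value is specified and A's and B's values differ.
def Pre_determine (stones : List Int) (k : Int) (n : Int) : Prop := 1 ≤ k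
instance (stones : List Int) (k : Int) (n : Int) : Decidable (Pre_determine stones k n) := by unfold Pre_determine; infer_instance

def pvWitness_determine : List Int × Int × Int := ([2, 5, 1, 1, 4], 2, 3)

def Spec_determine (stones : List Int) (k : Int) (n : Int) (out : Bool) : Prop := out = determine_alt stones k n
instance (stones : List Int) (k : Int) (n : Int) (out : Bool) : Decidable (Spec_determine stones k n out) := by unfold Spec_determine; infer_instance

-- ===== CLAIM (what is proved, stated in full; the proofs are below) =====
def Claim_equal_determine : Prop := ∀ (stones : List Int) (k : Int) (n : Int), Dom_determine stones k n → Pre_determine stones k n → Spec_determine stones k n (determine stones k n)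

-- ===== LEMMAS AND PROOFS =====

-- bad-stone flags, and the max counter value A's loop ever attains (abstracted over flags)
def pvMB : List Bool → Int → Int
  | [], c => c
  | true :: r, c => max c (pvMB r (c + 1))
  | false :: r, c => max c (pvMB r 0)

-- run-gap list with an accumulator: lengths of maximal bad runs (first one extended by c)
def pvGapsC : List Bool → Int → List Int
  | [], c => [c]
  | true :: r, c => pvGapsC r (c + 1)
  | false :: r, c => c :: pvGapsC r 0

-- positions (from off) of the good stones
def pvIdxs : List Bool → Int → List Int
  | [], _ => []
  | true :: r, off => pvIdxs r (off + 1)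
  | false :: r, off => off :: pvIdxs r (off + 1)

-- consecutive differences minus one
def pvZg : Int → List Int → List Int
  | _, [] => []
  | p, y :: l => (y - p - 1) :: pvZg y l

def pvLMax : List Int → Int
  | [] => 0
  | h :: t => t.foldl max h

theorem pv_zip_map_eq_pvZg (l : List Int) (x : Int) :
    (((x :: l).zip l).map (fun p => p.2 - p.1 - 1)) = pvZg x l := by
  induction l generalizing x with
  | nil => simp [pvZg]
  | cons y l ih =>
    rw [List.zip_cons_cons, List.map_cons, pvZg, ih y]

theorem pv_key (bs : List Bool) (prev off : Int) :
    pvZg prev (pvIdxs bs off ++ [off + bs.length]) = pvGapsC bs (off - prev - 1) := by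
  induction bs generalizing prev off with
  | nil => simp [pvIdxs, pvZg, pvGapsC]
  | cons b r ih =>
    cases b with
    | true =>
      have h := ih prev (off + 1)
      simp only [pvIdxs, pvGapsC, List.length_cons]
      have e1 : off + ((r.length : Int) + 1) = (off + 1) + (r.length : Int) := by ring
      have e2 : off + 1 - prev - 1 = (off - prev - 1) + 1 := by ring
      rw [show (off + ((r.length : Int) + 1)) = (off + 1) + (r.length : Int) by ring] at *
      push_cast
      rw [show off + ((r.length : Int) + 1) = (off + 1) + (r.length : Int) by ring, h, e2]
    | false =>
      have h := ih off (off + 1)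
      simp only [pvIdxs, pvGapsC, List.cons_append, pvZg, List.length_cons]
      push_cast
      rw [show off + ((r.length : Int) + 1) = (off + 1) + (r.length : Int) by ring, h]
      simp

theorem pv_good_eq_pvIdxs (stones : List Int) (n off : Int) :
    ((PySem.List.enumerate stones off).filter (fun p => decide (1 ≤ p.2 - n))).map (fun p => p.1)
      = pvIdxs (stones.map (fun s => decide (s - n < 1))) off := by
  induction stones generalizing off with
  | nil => simp [PySem.List.enumerate, pvIdxs]
  | cons s r ih =>
    rw [PySem.List.enumerate_cons]
    by_cases h : s - n < 1
    · have h1 : (decide (1 ≤ s - n)) = false := by simp; omega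
      have h2 : (decide (s - n < 1)) = true := by simp [h]
      simp [List.filter_cons, h1, h2, pvIdxs, ih (off + 1)]
    · have h1 : (decide (1 ≤ s - n)) = true := by simp; omega
      have h2 : (decide (s - n < 1)) = false := by simp; omega
      simp [List.filter_cons, h1, h2, pvIdxs, ih (off + 1)]

theorem pv_gapsC_ne_nil (bs : List Bool) (c : Int) : pvGapsC bs c ≠ [] := by
  induction bs generalizing c with
  | nil => simp [pvGapsC]
  | cons b r ih => cases b <;> simp [pvGapsC, ih]

theorem pv_le_foldl_max (l : List Int) (b : Int) : b ≤ l.foldl max b := by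
  induction l generalizing b with
  | nil => simp
  | cons x l ih => exact le_trans (le_max_left b x) (ih (max b x))

theorem pv_foldl_max_comm (t : List Int) (a b : Int) :
    t.foldl max (max a b) = max a (t.foldl max b) := by
  induction t generalizing b with
  | nil => simp
  | cons x t ih => simpa [max_assoc] using ih (max b x)

theorem pv_le_lmax_gapsC (bs : List Bool) (c : Int) : c ≤ pvLMax (pvGapsC bs c) := by
  induction bs generalizing c with
  | nil => simp [pvGapsC, pvLMax]
  | cons b r ih =>
    cases b with
    | true => exact le_trans (by omega) (ih (c + 1))
    | false =>
      simp only [pvGapsC, pvLMax]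
      exact pv_le_foldl_max _ c

theorem pv_le_pvMB (bs : List Bool) (c : Int) : c ≤ pvMB bs c := by
  cases bs with
  | nil => simp [pvMB]
  | cons b r => cases b <;> simp [pvMB]

theorem pv_MB_eq_lmax (bs : List Bool) (c : Int) : pvMB bs c = pvLMax (pvGapsC bs c) := by
  induction bs generalizing c with
  | nil => simp [pvMB, pvGapsC, pvLMax]
  | cons b r ih =>
    cases b with
    | true =>
      simp only [pvMB, pvGapsC, ih (c + 1)]
      exact max_eq_right (le_trans (by omega) (pv_le_lmax_gapsC r (c + 1)))
    | false =>
      simp only [pvMB, pvGapsC, ih 0]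
      obtain ⟨h, t, e⟩ := List.exists_cons_of_ne_nil (pv_gapsC_ne_nil r 0)
      rw [e]
      simp only [pvLMax, List.foldl_cons]
      exact (pv_foldl_max_comm t c h).symm

theorem pv_go_eq (k n : Int) (hk : 1 ≤ k) (stones : List Int) (c : Int)
    (hc0 : 0 ≤ c) (hck : c < k) :
    determineGo k n stones c = decide (pvMB (stones.map (fun s => decide (s - n < 1))) c < k) := by
  induction stones generalizing c with
  | nil => simp [determineGo, pvMB, hck]
  | cons s r ih =>
    by_cases hb : s - n < 1
    · have hd : (decide (s - n < 1)) = true := by simp [hb]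
      simp only [List.map_cons, hd, pvMB]
      rw [show determineGo k n (s :: r) c
            = if c + 1 = k then false else determineGo k n r (c + 1) by
          simp [determineGo, hb]]
      by_cases he : c + 1 = k
      · rw [if_pos he]
        have h1 := pv_le_pvMB (r.map (fun s => decide (s - n < 1))) (c + 1)
        have h2 : ¬ (max c (pvMB (r.map (fun s => decide (s - n < 1))) (c + 1)) < k) := by
          have := le_max_right c (pvMB (r.map (fun s => decide (s - n < 1))) (c + 1))
          omega
        exact (decide_eq_false h2).symm
      · rw [if_neg he, ih (c + 1) (by omega) (by omega)]
        simp only [decide_eq_decide, max_lt_iff]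
        exact ⟨fun h => ⟨hck, h⟩, fun h => h.2⟩
    · have hd : (decide (s - n < 1)) = false := by simp; omega
      simp only [List.map_cons, hd, pvMB]
      rw [show determineGo k n (s :: r) c
            = if (0 : Int) = k then false else determineGo k n r 0 by
          simp [determineGo, hb]]
      rw [if_neg (by omega), ih 0 (by omega) (by omega)]
      simp only [decide_eq_decide, max_lt_iff]
      exact ⟨fun h => ⟨hck, h⟩, fun h => h.2⟩

theorem pv_alt_eq (stones : List Int) (k n : Int) :
    determine_alt stones k n
      = decide (pvLMax (pvGapsC (stones.map (fun s => decide (s - n < 1))) 0) < k) := by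
  unfold determine_alt
  simp only [decide_eq_decide]
  rw [pv_good_eq_pvIdxs stones n 0]
  simp only [List.tail_cons]
  rw [pv_zip_map_eq_pvZg (pvIdxs (stones.map (fun s => decide (s - n < 1))) 0
        ++ [(stones.length : Int)]) (-1)]
  have hkey := pv_key (stones.map (fun s => decide (s - n < 1))) (-1) 0
  rw [List.length_map] at hkey
  rw [show (0 : Int) + (stones.length : Int) = (stones.length : Int) by ring,
      show (0 : Int) - (-1) - 1 = 0 by ring] at hkey
  rw [hkey]
  obtain ⟨h, t, e⟩ :=
    List.exists_cons_of_ne_nil (pv_gapsC_ne_nil (stones.map (fun s => decide (s - n < 1))) 0)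
  rw [e, PySem.List.max?_id_cons, Option.getD_some]
  simp [pvLMax]

-- ===== VERDICT (by name: the statement is the Claim_ definition above) =====
theorem determine_spec : Claim_equal_determine := by
  intro stones k n _hdom hk
  unfold Pre_determine at hk
  unfold Spec_determine
  rw [pv_alt_eq stones k n]
  unfold determine
  rw [pv_go_eq k n hk stones 0 (by omega) (by omega : (0:Int) < k)]
  rw [pv_MB_eq_lmax]
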